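-- pv_equiv track=rewrite | github.com/chewster/jukebox | library.py | _valid_format
-- ===== SOURCE A (Python) =====
-- def _valid_format(selection: str) -> bool:
--     parts = selection.split("-")
--     return (
--         len(parts) == 2
--         and len(parts[0]) == 2
--         and len(parts[1]) == 2
--         and all(p.isdigit() for p in parts)
--     )
-- ===== SOURCE B (Python) =====
-- def _valid_format(selection: str) -> bool:
--     return (
--         len(selection) == 5
--         and selection[2] == "-"
--         and selection[:2].isdigit()
--         and selection[3:].isdigit()
--     )
-- ===== Notes on version B (the rewrite author's own statement) =====
-- stated objective: simpler
-- what changed: Replaces splitting the selection into a parts list and checking the list with direct fixed-position validation: length check, dash at the middle index, and isdigit on the two two-character halves, building no intermediate list.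
import Mathlib
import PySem

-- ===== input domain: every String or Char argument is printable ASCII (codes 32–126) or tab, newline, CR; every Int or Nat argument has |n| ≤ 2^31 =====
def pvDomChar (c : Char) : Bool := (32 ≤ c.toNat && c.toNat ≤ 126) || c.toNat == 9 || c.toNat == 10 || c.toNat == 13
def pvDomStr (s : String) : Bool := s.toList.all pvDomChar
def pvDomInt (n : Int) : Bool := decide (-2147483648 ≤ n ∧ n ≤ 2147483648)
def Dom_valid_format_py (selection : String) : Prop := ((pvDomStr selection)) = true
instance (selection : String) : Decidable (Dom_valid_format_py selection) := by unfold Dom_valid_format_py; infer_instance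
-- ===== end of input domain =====

-- B validates the selection by fixed positions (length 5, dash at index 2, two digit halves)
-- instead of splitting on "-" into a list of parts: simpler, no intermediate list.


-- ===== PORT A =====
-- parts = selection.split("-"); len(parts)==2 and len(parts[0])==2 and len(parts[1])==2 and all(p.isdigit() for p in parts)
def valid_format_py (selection : String) : Bool :=
  match PySem.Str.split? selection "-" with
  | none => false  -- unreachable: the separator "-" is non-empty
  | some parts =>
    decide (parts.length = 2) &&
    decide (PySem.Str.len (PySem.List.pyGetD parts 0 "") = 2) &&
    decide (PySem.Str.len (PySem.List.pyGetD parts 1 "") = 2) &&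
    parts.all (fun p => PySem.Str.strIsdigit p)

-- ===== PORT B =====
-- len(selection)==5 and selection[2]=="-" and selection[:2].isdigit() and selection[3:].isdigit()
def valid_format_py_alt (selection : String) : Bool :=
  decide (PySem.Str.len selection = 5) &&
  (PySem.Str.pyGet? selection 2 == some '-') &&
  PySem.Str.strIsdigit (PySem.Str.slice selection none (some 2)) &&
  PySem.Str.strIsdigit (PySem.Str.slice selection (some 3) none)

-- ===== PRECONDITION & SPEC =====
def Spec_valid_format_py (selection : String) (out : Bool) : Prop := out = valid_format_py_alt selection
instance (selection : String) (out : Bool) : Decidable (Spec_valid_format_py selection out) := by unfold Spec_valid_format_py; infer_instance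

-- ===== CLAIM (what is proved, stated in full; the proofs are below) =====
def Claim_equal_valid_format_py : Prop := ∀ (selection : String), Dom_valid_format_py selection → Spec_valid_format_py selection (valid_format_py selection)

-- ===== LEMMAS AND PROOFS =====

-- A simple structural description of splitting on one separator character.
def spChar (c : Char) : List Char → List (List Char)
  | [] => [[]]
  | x :: xs =>
    if x = c then [] :: spChar c xs
    else
      match spChar c xs with
      | [] => [[x]]
      | p :: ps => (x :: p) :: ps

theorem spChar_ne_nil (c : Char) (l : List Char) : spChar c l ≠ [] := by
  induction l with
  | nil => simp [spChar]
  | cons x xs ih =>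
    simp only [spChar]
    split_ifs with h
    · simp
    · cases hs : spChar c xs <;> simp

theorem splitOn_go_single (c : Char) (l : List Char) :
    ∀ (fuel : Nat), l.length < fuel → ∀ (cur : List Char) (acc : List (List Char)),
    PySem.Chars.splitOn.go [c] fuel l cur acc =
      acc.reverse ++ (spChar c l).modifyHead (fun p => cur.reverse ++ p) := by
  induction l with
  | nil =>
    intro fuel hf cur acc
    cases fuel with
    | zero => omega
    | succ f => simp [PySem.Chars.splitOn.go, spChar]
  | cons x xs ih =>
    intro fuel hf cur acc
    cases fuel with
    | zero => simp at hf
    | succ f =>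
      rw [PySem.Chars.splitOn.go]
      by_cases h : x = c
      · subst h
        simp only [List.isPrefixOf, beq_self_eq_true, Bool.true_and, if_true,
          List.length_singleton, List.drop_succ_cons, List.drop_zero]
        rw [ih f (by simpa using hf) [] (cur.reverse :: acc)]
        rcases hs : spChar x xs with _ | ⟨p, ps⟩
        · exact absurd hs (spChar_ne_nil x xs)
        · simp [spChar, hs, List.modifyHead]
      · have hpre : [c].isPrefixOf (x :: xs) = false := by
          simp [List.isPrefixOf]; exact fun hcx => absurd hcx.symm h
        rw [hpre]
        simp only [if_false, Bool.false_eq_true]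
        rw [ih f (by simpa using hf) (x :: cur) acc]
        rcases hs : spChar c xs with _ | ⟨p, ps⟩
        · exact absurd hs (spChar_ne_nil c xs)
        · simp [spChar, h, hs, List.modifyHead]

theorem splitOn_single (c : Char) (l : List Char) :
    PySem.Chars.splitOn l [c] = spChar c l := by
  unfold PySem.Chars.splitOn
  rw [splitOn_go_single c l (l.length + 1) (by omega) [] []]
  rcases hs : spChar c l with _ | ⟨p, ps⟩
  · exact absurd hs (spChar_ne_nil c l)
  · simp [List.modifyHead]

theorem spChar_single_iff (c : Char) (l q : List Char) :
    spChar c l = [q] ↔ (l = q ∧ c ∉ q) := by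
  induction l generalizing q with
  | nil =>
    constructor
    · rintro h; simp [spChar] at h; subst h; simp
    · rintro ⟨h, _⟩; subst h; rfl
  | cons x xs ih =>
    by_cases hx : x = c
    · subst hx
      simp only [spChar, if_true]
      constructor
      · intro h
        obtain ⟨h1, h2⟩ := List.cons_eq_cons.mp h
        exact absurd h2 (spChar_ne_nil x xs)
      · rintro ⟨h, hq⟩
        subst h
        simp at hq
    · simp only [spChar, if_neg hx]
      rcases hs : spChar c xs with _ | ⟨p, ps⟩
      · exact absurd hs (spChar_ne_nil c xs)
      · constructor
        · intro h
          obtain ⟨h1, h2⟩ := List.cons_eq_cons.mp h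
          subst h2
          obtain ⟨hxs, hcp⟩ := (ih p).mp hs
          subst hxs
          refine ⟨h1, ?_⟩
          rw [← h1]
          simp only [List.mem_cons, not_or]
          exact ⟨fun hh => hx hh.symm, hcp⟩
        · rintro ⟨h, hq⟩
          subst h
          simp only [List.mem_cons, not_or] at hq
          have := (ih xs).mpr ⟨rfl, hq.2⟩
          rw [hs] at this
          obtain ⟨h1, h2⟩ := List.cons_eq_cons.mp this
          simp [h1, h2]

theorem spChar_pair_iff (c : Char) (l p q : List Char) :
    spChar c l = [p, q] ↔ (l = p ++ c :: q ∧ c ∉ p ∧ c ∉ q) := by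
  induction l generalizing p with
  | nil =>
    constructor
    · intro h; simp [spChar] at h
    · rintro ⟨h, _, _⟩; simp at h
  | cons x xs ih =>
    by_cases hx : x = c
    · subst hx
      simp only [spChar, if_true]
      constructor
      · intro h
        obtain ⟨h1, h2⟩ := List.cons_eq_cons.mp h
        obtain ⟨hxs, hcq⟩ := (spChar_single_iff x xs q).mp h2
        subst hxs
        exact ⟨by simp [← h1], by simp [← h1], hcq⟩
      · rintro ⟨h, hp, hq⟩
        rcases p with _ | ⟨y, p'⟩
        · simp only [List.nil_append] at h
          obtain ⟨-, hxs⟩ := List.cons_eq_cons.mp h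
          rw [(spChar_single_iff x xs q).mpr ⟨hxs, hq⟩]
        · obtain ⟨h1, -⟩ := List.cons_eq_cons.mp h
          simp only [List.mem_cons, not_or] at hp
          exact absurd h1 hp.1
    · simp only [spChar, if_neg hx]
      rcases hs : spChar c xs with _ | ⟨r, rs⟩
      · exact absurd hs (spChar_ne_nil c xs)
      · constructor
        · intro h
          obtain ⟨h1, h2⟩ := List.cons_eq_cons.mp h
          subst h1
          rw [h2] at hs
          obtain ⟨hxs, hcr, hcq⟩ := (ih r).mp hs
          subst hxs
          refine ⟨rfl, ?_, hcq⟩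
          simp only [List.mem_cons, not_or]
          exact ⟨fun hh => hx hh.symm, hcr⟩
        · rintro ⟨h, hp, hq⟩
          rcases p with _ | ⟨y, p'⟩
          · simp only [List.nil_append] at h
            obtain ⟨h1, -⟩ := List.cons_eq_cons.mp h
            exact absurd h1 hx
          · obtain ⟨h1, h2⟩ := List.cons_eq_cons.mp h
            subst h1
            simp only [List.mem_cons, not_or] at hp
            have := (ih p').mpr ⟨h2, hp.2, hq⟩
            rw [hs] at this
            obtain ⟨h3, h4⟩ := List.cons_eq_cons.mp this
            simp [h3, h4]

def goodShape (l : List Char) : Prop :=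
  ∃ p q : List Char, l = p ++ '-' :: q ∧ p.length = 2 ∧ q.length = 2 ∧
    p.all PySem.Chars.isdigit = true ∧ q.all PySem.Chars.isdigit = true

theorem dash_not_mem_of_all_digit (p : List Char) (h : p.all PySem.Chars.isdigit = true) :
    '-' ∉ p := by
  intro hm
  have := List.all_eq_true.mp h '-' hm
  simp [PySem.Chars.isdigit] at this

theorem A_iff (s : String) : valid_format_py s = true ↔ goodShape s.toList := by
  unfold valid_format_py
  have hsplit : PySem.Str.split? s "-" = some ((spChar '-' s.toList).map String.ofList) := by
    have h1 : PySem.Chars.split? s.toList ['-'] = some (spChar '-' s.toList) := by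
      simp [PySem.Chars.split?, splitOn_single]
    simp [PySem.Str.split?, h1]
  rw [hsplit]
  rcases hs : spChar '-' s.toList with _ | ⟨p, rest⟩
  · exact absurd hs (spChar_ne_nil _ _)
  rcases rest with _ | ⟨q, rest2⟩
  · simp only [List.map_cons, List.map_nil, List.length_singleton]
    constructor
    · intro h; simp at h
    · rintro ⟨p', q', hl, hp2, hq2, hpd, hqd⟩
      have : spChar '-' s.toList = [p', q'] := (spChar_pair_iff '-' s.toList p' q').mpr
        ⟨hl, dash_not_mem_of_all_digit p' hpd, dash_not_mem_of_all_digit q' hqd⟩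
      rw [hs] at this; simp at this
  rcases rest2 with _ | ⟨r, rest3⟩
  · -- exactly two parts
    obtain ⟨hl, hnp, hnq⟩ := (spChar_pair_iff '-' s.toList p q).mp hs
    simp only [List.map_cons, List.map_nil]
    constructor
    · intro h
      simp [PySem.List.pyGetD, PySem.List.pyGet?, PySem.List.pyIdx?, PySem.Str.len,
        PySem.Str.strIsdigit, PySem.Chars.strIsdigit] at h
      obtain ⟨⟨hp2, hq2⟩, ⟨-, hpd⟩, -, hqd⟩ := h
      exact ⟨p, q, hl, by exact_mod_cast hp2, by exact_mod_cast hq2,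
        List.all_eq_true.mpr hpd, List.all_eq_true.mpr hqd⟩
    · rintro ⟨p', q', hl', hp2, hq2, hpd, hqd⟩
      have hpair := (spChar_pair_iff '-' s.toList p' q').mpr
        ⟨hl', dash_not_mem_of_all_digit p' hpd, dash_not_mem_of_all_digit q' hqd⟩
      rw [hs] at hpair
      obtain ⟨e1, e2⟩ := List.cons_eq_cons.mp hpair
      obtain ⟨e3, -⟩ := List.cons_eq_cons.mp e2
      subst e1; subst e3
      simp [PySem.List.pyGetD, PySem.Str.len, PySem.Str.strIsdigit,
        PySem.Chars.strIsdigit, hp2, hq2, hpd, hqd, List.isEmpty_eq_false_iff,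
        ← List.length_pos_iff]
  · -- three or more parts
    simp only [List.map_cons, List.length_cons]
    constructor
    · intro h; simp at h
    · rintro ⟨p', q', hl, hp2, hq2, hpd, hqd⟩
      have : spChar '-' s.toList = [p', q'] := (spChar_pair_iff '-' s.toList p' q').mpr
        ⟨hl, dash_not_mem_of_all_digit p' hpd, dash_not_mem_of_all_digit q' hqd⟩
      rw [hs] at this; simp at this

theorem take_dash_drop (l : List Char) (h5 : l.length = 5) (h2 : l[2]? = some '-') :
    l = l.take 2 ++ '-' :: l.drop 3 := by
  have h2' : l[2]'(by omega) = '-' := by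
    have := List.getElem?_eq_getElem (l := l) (i := 2) (by omega)
    rw [this] at h2; exact Option.some.inj h2
  calc l = l.take 2 ++ l.drop 2 := (List.take_append_drop 2 l).symm
    _ = l.take 2 ++ '-' :: l.drop 3 := by
        rw [List.drop_eq_getElem_cons (by omega : 2 < l.length), h2']

theorem B_iff (s : String) : valid_format_py_alt s = true ↔ goodShape s.toList := by
  unfold valid_format_py_alt
  have hsl1 : (PySem.Str.slice s none (some 2)).toList = s.toList.take 2 := by
    simp [PySem.Str.toList_slice, PySem.List.slice_to]
  have hsl2 : (PySem.Str.slice s (some 3) none).toList = s.toList.drop 3 := by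
    simp [PySem.Str.toList_slice, PySem.List.slice_from]
  have hget : PySem.Str.pyGet? s 2 = s.toList[2]? := by
    simp only [PySem.Str.pyGet?_eq, PySem.Chars.pyGet?_eq_listPyGet?]
    simp [PySem.List.pyGet?, PySem.List.pyIdx?]
    by_cases h : 2 < s.length <;> simp [h]
  constructor
  · intro h
    simp only [Bool.and_eq_true, decide_eq_true_eq, beq_iff_eq] at h
    obtain ⟨⟨⟨h5, h2⟩, hpd⟩, hqd⟩ := h
    have h5' : s.toList.length = 5 := by
      simp [PySem.Str.len] at h5; exact_mod_cast h5
    rw [hget] at h2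
    rw [PySem.Str.strIsdigit, hsl1] at hpd
    rw [PySem.Str.strIsdigit, hsl2] at hqd
    simp only [PySem.Chars.strIsdigit, Bool.and_eq_true] at hpd hqd
    exact ⟨s.toList.take 2, s.toList.drop 3, take_dash_drop s.toList h5' h2,
      by simp [h5'], by simp [h5'], hpd.2, hqd.2⟩
  · rintro ⟨p, q, hl, hp2, hq2, hpd, hqd⟩
    have h5' : s.toList.length = 5 := by simp [hl, hp2, hq2]
    have hp : s.toList.take 2 = p := by
      rw [hl, ← hp2, List.take_left]
    have hq : s.toList.drop 3 = q := by
      have h3 : s.toList.drop 3 = (p ++ '-' :: q).drop (p.length + 1) := by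
        rw [hl, hp2]
      rw [h3, List.drop_append]; simp
    have hg2 : s.toList[2]? = some '-' := by
      rw [hl, List.getElem?_append_right (by omega), hp2]
      simp
    simp only [Bool.and_eq_true, decide_eq_true_eq, beq_iff_eq]
    refine ⟨⟨⟨?_, ?_⟩, ?_⟩, ?_⟩
    · simp [PySem.Str.len, h5']
    · rw [hget, hg2]
    · rw [PySem.Str.strIsdigit, hsl1, hp]
      simp [PySem.Chars.strIsdigit, hpd, List.isEmpty_eq_false_iff, ← List.length_pos_iff, hp2]
    · rw [PySem.Str.strIsdigit, hsl2, hq]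
      simp [PySem.Chars.strIsdigit, hqd, List.isEmpty_eq_false_iff, ← List.length_pos_iff, hq2]

-- ===== VERDICT (by name: the statement is the Claim_ definition above) =====
theorem valid_format_py_spec : Claim_equal_valid_format_py := by
  intro s _
  unfold Spec_valid_format_py
  rw [Bool.eq_iff_iff, A_iff, B_iff]
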